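-- pv_equiv track=rewrite | github.com/motosw3600/Algorithm | String/remove by pair.py | solution
-- ===== SOURCE A (Python) =====
-- def solution(s):
--     i = 0
--     stack = []
--
--     for i in s:
--         if stack[-1:] == [i]:
--             stack.pop()
--         else:
--             stack.append(i)
--
--     return 0 if len(stack) > 0 else 1
-- ===== SOURCE B (Python) =====
-- def solution(s):
--     chars = list(s)
--     i = 0
--     while i + 1 < len(chars):
--         if chars[i] == chars[i + 1]:
--             del chars[i:i + 2]
--             i = 0  # restart the scan from the front
--         else:
--             i += 1
--     return 1 if not chars else 0
-- ===== Notes on version B (the rewrite author's own statement) =====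
-- stated objective: alternative
-- what changed: Replaced the single-pass stack reduction with a repeated-rescan fixpoint that splices out the first adjacent equal pair and restarts until no pair remains; equal by confluence of adjacent-pair cancellation.
import Mathlib
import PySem

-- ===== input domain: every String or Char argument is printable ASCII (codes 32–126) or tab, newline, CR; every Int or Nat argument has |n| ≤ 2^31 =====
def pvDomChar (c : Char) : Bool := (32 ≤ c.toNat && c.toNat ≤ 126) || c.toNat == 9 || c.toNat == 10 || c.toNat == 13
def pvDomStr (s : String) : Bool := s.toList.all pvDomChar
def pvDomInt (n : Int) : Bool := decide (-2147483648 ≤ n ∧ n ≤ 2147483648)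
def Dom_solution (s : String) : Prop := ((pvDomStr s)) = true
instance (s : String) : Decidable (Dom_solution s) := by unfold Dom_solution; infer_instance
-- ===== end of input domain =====

-- B replaces A's single-pass stack with a repeated-rescan fixpoint removing the first
-- adjacent equal pair until none remains (an alternative algorithm, not faster).

-- ===== PORT A =====
-- one loop step: pop if the top of the stack equals the incoming char, else push
def pyStep (st : List Char) (c : Char) : List Char :=
  if st.head? = some c then st.tail else c :: st

def solution (s : String) : Int :=
  let stack := s.toList.foldl pyStep []
  if stack.length > 0 then 0 else 1

-- ===== PORT B =====
-- find the first adjacent equal pair and splice it out (none = no such pair)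
def removeFirstPair : List Char → Option (List Char)
  | [] => none
  | [_] => none
  | a :: b :: t => if a = b then some t else (removeFirstPair (b :: t)).map (a :: ·)

theorem removeFirstPair_length :
    ∀ {l l' : List Char}, removeFirstPair l = some l' → l'.length < l.length
  | [], _, h => by simp [removeFirstPair] at h
  | [_], _, h => by simp [removeFirstPair] at h
  | a :: b :: t, l', h => by
    by_cases hab : a = b
    · simp [removeFirstPair, hab] at h
      subst h; simp
    · simp [removeFirstPair, hab] at h
      obtain ⟨l'', h1, h2⟩ := h
      subst h2
      have := removeFirstPair_length h1
      simp only [List.length_cons] at this ⊢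
      omega

-- repeatedly remove the first adjacent equal pair, restarting, until a fixpoint
def reduceB (l : List Char) : List Char :=
  match h : removeFirstPair l with
  | none => l
  | some l' => reduceB l'
termination_by l.length
decreasing_by exact removeFirstPair_length h

def solution_alt (s : String) : Int :=
  if reduceB s.toList = [] then 1 else 0

-- ===== PRECONDITION & SPEC =====
def Spec_solution (s : String) (out : Int) : Prop := out = solution_alt s
instance (s : String) (out : Int) : Decidable (Spec_solution s out) := by unfold Spec_solution; infer_instance

-- ===== CLAIM (what is proved, stated in full; the proofs are below) =====
def Claim_equal_solution : Prop := ∀ (s : String), Dom_solution s → Spec_solution s (solution s)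

-- ===== LEMMAS AND PROOFS =====

-- unfolding equations for reduceB
theorem reduceB_none {l : List Char} (h : removeFirstPair l = none) : reduceB l = l := by
  rw [reduceB]; split <;> simp_all

theorem reduceB_some {l l' : List Char} (h : removeFirstPair l = some l') :
    reduceB l = reduceB l' := by
  rw [reduceB]; split <;> simp_all

-- a stack produced by pyStep never has two equal adjacent elements
-- (IsChain (· ≠ ·)); removing an adjacent equal pair from the remaining input
-- does not change the fold, and input without pairs is just reversed.

theorem foldl_pair {st : List Char} (hst : st.IsChain (· ≠ ·)) (c : Char) (v : List Char) :
    (c :: c :: v).foldl pyStep st = v.foldl pyStep st := by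
  cases st with
  | nil => simp [pyStep]
  | cons d t =>
    by_cases hdc : d = c
    · subst hdc
      have ht : ∀ y ∈ t.head?, d ≠ y := (List.isChain_cons.mp hst).1
      have : t.head? ≠ some d := by
        intro h; exact ht d h rfl
      simp [pyStep, this]
    · simp [pyStep, hdc]

theorem foldl_removeFirstPair :
    ∀ (l : List Char) {l' : List Char} (st : List Char), st.IsChain (· ≠ ·) →
      removeFirstPair l = some l' → l.foldl pyStep st = l'.foldl pyStep st
  | [], _, _, _, h => by simp [removeFirstPair] at h
  | [_], _, _, _, h => by simp [removeFirstPair] at h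
  | a :: b :: t, l', st, hst, h => by
    by_cases hab : a = b
    · simp [removeFirstPair, hab] at h
      subst h; subst hab
      exact foldl_pair hst a t
    · simp [removeFirstPair, hab] at h
      obtain ⟨l'', h1, h2⟩ := h
      subst h2
      have hstep : (pyStep st a).IsChain (· ≠ ·) := by
        unfold pyStep
        split
        · exact hst.tail
        · next hne =>
          refine List.isChain_cons.mpr ⟨?_, hst⟩
          intro y hy hay
          subst hay
          exact hne hy
      have := foldl_removeFirstPair (b :: t) (pyStep st a) hstep h1
      simpa using this

-- at the fixpoint the input has no adjacent equal pair
theorem removeFirstPair_none_chain :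
    ∀ {l : List Char}, removeFirstPair l = none → l.IsChain (· ≠ ·)
  | [], _ => List.isChain_nil
  | [_], _ => List.isChain_singleton _
  | a :: b :: t, h => by
    by_cases hab : a = b
    · simp [removeFirstPair, hab] at h
    · simp [removeFirstPair, hab] at h
      refine List.isChain_cons.mpr ⟨?_, removeFirstPair_none_chain h⟩
      intro y hy; simp at hy; subst hy; exact hab

-- pair-free input just reverses onto the stack (when the first char differs from the top)
theorem foldl_no_pair :
    ∀ (l : List Char) (st : List Char), l.IsChain (· ≠ ·) →
      (∀ b, l.head? = some b → st.head? ≠ some b) →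
      l.foldl pyStep st = l.reverse ++ st
  | [], st, _, _ => by simp
  | c :: rest, st, hl, hhd => by
    have hne : st.head? ≠ some c := hhd c rfl
    have : pyStep st c = c :: st := by simp [pyStep, hne]
    rw [List.foldl_cons, this,
        foldl_no_pair rest (c :: st) hl.tail ?_]
    · simp
    · intro b hb hcb
      simp at hcb
      exact (List.isChain_cons.mp hl).1 b hb hcb

theorem foldl_eq_reduceB_reverse : ∀ (l : List Char), l.foldl pyStep [] = (reduceB l).reverse := by
  intro l
  induction l using (measure List.length).wf.induction with
  | _ l ih =>
    cases h : removeFirstPair l with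
    | none =>
      rw [reduceB_none h, foldl_no_pair l [] (removeFirstPair_none_chain h) (by simp)]
      simp
    | some l' =>
      rw [foldl_removeFirstPair l [] List.isChain_nil h, reduceB_some h,
          ih l' (removeFirstPair_length h)]

-- ===== VERDICT (by name: the statement is the Claim_ definition above) =====
theorem solution_spec : Claim_equal_solution := by
  intro s _
  unfold Spec_solution solution solution_alt
  rw [foldl_eq_reduceB_reverse]
  rcases h : reduceB s.toList with _ | ⟨a, t⟩ <;> simp
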